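-- pv_equiv track=rewrite | github.com/deysanjeeb/SKU-generator | main.py | generate_child_skus
-- ===== SOURCE A (Python) =====
-- from itertools import product
--
-- def generate_child_skus(parent_sku):
--     # Define the variations
--     variations = {
--         'color_temp': ['3500K', '4500K', '6500K', '2700-6500K'],
--         'lumens_per_watt': ['130', '140', '150'],
--         'color': ['Black', 'White']
--     }
--
--     # Generate all combinations
--     combinations = product(variations['color_temp'], variations['lumens_per_watt'], variations['color'])
--
--     # Generate child SKUs
--     child_skus = []
--     for combo in combinations:
--         color_temp, lumens, color = combo
--
--         # Skip combinations that don't exist in the given list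
--         if color_temp == '2700-6500K' and lumens != '150':
--             continue
--         if color_temp == '3500K' and lumens == '150':
--             continue
--         if color_temp == '4500K' and lumens == '140':
--             continue
--
--         child_sku = f"{parent_sku}-{color_temp.replace('-', '')}-{lumens}-{color}"
--         description = f"{color_temp} Diffused Glow 12W-1 Feet {color}-{lumens} Lum/Watt"
--         child_skus.append((child_sku, description))
--
--     return child_skus
-- ===== SOURCE B (Python) =====
-- def generate_child_skus(parent_sku):
--     # Precomputed table of the valid (color_temp, lumens) pairs, in product order
--     valid_pairs = [
--         ('3500K', '130'), ('3500K', '140'),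
--         ('4500K', '130'), ('4500K', '150'),
--         ('6500K', '130'), ('6500K', '140'), ('6500K', '150'),
--         ('2700-6500K', '150'),
--     ]
--     return [
--         (f"{parent_sku}-{color_temp.replace('-', '')}-{lumens}-{color}",
--          f"{color_temp} Diffused Glow 12W-1 Feet {color}-{lumens} Lum/Watt")
--         for color_temp, lumens in valid_pairs
--         for color in ('Black', 'White')
--     ]
-- ===== Notes on version B (the rewrite author's own statement) =====
-- stated objective: simpler
-- what changed: B replaces the Cartesian product with skip-guards by a precomputed table of the 8 valid (color_temp, lumens) pairs and a flat comprehension over colors.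
import Mathlib
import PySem

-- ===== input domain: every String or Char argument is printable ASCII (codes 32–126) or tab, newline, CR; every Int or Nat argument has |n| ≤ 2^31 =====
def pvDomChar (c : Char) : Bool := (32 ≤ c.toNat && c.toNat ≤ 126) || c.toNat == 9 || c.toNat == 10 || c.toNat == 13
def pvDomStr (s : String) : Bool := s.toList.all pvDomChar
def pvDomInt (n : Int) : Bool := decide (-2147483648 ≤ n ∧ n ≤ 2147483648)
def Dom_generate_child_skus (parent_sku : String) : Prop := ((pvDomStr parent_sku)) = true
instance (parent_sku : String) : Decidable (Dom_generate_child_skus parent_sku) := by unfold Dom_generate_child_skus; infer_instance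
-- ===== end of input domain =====

-- B drops the product-plus-skip filter for a precomputed table of the 8 valid pairs (simpler).

-- ===== PORT A =====
-- itertools.product of the three variation lists, in Python's order
def pvProduct3 (xs ys zs : List String) : List (String × String × String) :=
  xs.flatMap (fun x => ys.flatMap (fun y => zs.map (fun z => (x, y, z))))

def generate_child_skus (parent_sku : String) : List (String × String) :=
  let combinations := pvProduct3 ["3500K", "4500K", "6500K", "2700-6500K"]
                                 ["130", "140", "150"] ["Black", "White"]
  combinations.foldl (fun child_skus combo =>
    let color_temp := combo.1
    let lumens := combo.2.1
    let color := combo.2.2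
    if color_temp == "2700-6500K" && lumens != "150" then child_skus
    else if color_temp == "3500K" && lumens == "150" then child_skus
    else if color_temp == "4500K" && lumens == "140" then child_skus
    else
      let child_sku := parent_sku ++ "-" ++ PySem.Str.replace color_temp "-" "" ++ "-" ++ lumens ++ "-" ++ color
      let description := color_temp ++ " Diffused Glow 12W-1 Feet " ++ color ++ "-" ++ lumens ++ " Lum/Watt"
      child_skus ++ [(child_sku, description)]) []

-- ===== PORT B =====
def generate_child_skus_alt (parent_sku : String) : List (String × String) :=
  let valid_pairs : List (String × String) :=
    [("3500K", "130"), ("3500K", "140"),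
     ("4500K", "130"), ("4500K", "150"),
     ("6500K", "130"), ("6500K", "140"), ("6500K", "150"),
     ("2700-6500K", "150")]
  valid_pairs.flatMap (fun p =>
    ["Black", "White"].map (fun color =>
      (parent_sku ++ "-" ++ PySem.Str.replace p.1 "-" "" ++ "-" ++ p.2 ++ "-" ++ color,
       p.1 ++ " Diffused Glow 12W-1 Feet " ++ color ++ "-" ++ p.2 ++ " Lum/Watt")))

-- ===== PRECONDITION & SPEC =====
def Spec_generate_child_skus (parent_sku : String) (out : List (String × String)) : Prop := out = generate_child_skus_alt parent_sku
instance (parent_sku : String) (out : List (String × String)) : Decidable (Spec_generate_child_skus parent_sku out) := by unfold Spec_generate_child_skus; infer_instance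

-- ===== CLAIM (what is proved, stated in full; the proofs are below) =====
def Claim_equal_generate_child_skus : Prop := ∀ (parent_sku : String), Dom_generate_child_skus parent_sku → Spec_generate_child_skus parent_sku (generate_child_skus parent_sku)

-- ===== LEMMAS AND PROOFS =====

-- ===== VERDICT (by name: the statement is the Claim_ definition above) =====
theorem generate_child_skus_spec : Claim_equal_generate_child_skus := by
  intro parent_sku _
  show _ = _
  rfl
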